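-- pv_equiv track=rewrite | github.com/minseunghwang/Algorithm | TEST/TOSS/Server delveloper - 1.py | solution
-- ===== SOURCE A (Python) =====
-- def solution(user_input):
--     for i in range(len(user_input)):
--         if user_input[-1] == '1':
--             return False;
--         if user_input[i] != '1' and user_input[i] != '2':
--             return False
--         if i<len(user_input)-1 and user_input[i]=='1' and user_input[i+1] != '2':
--             return False
--     return True;
-- ===== SOURCE B (Python) =====
-- import re
--
-- _PAT = re.compile(r'(?:12|2)*')
--
-- def solution(user_input):
--     return bool(_PAT.fullmatch(user_input))
-- ===== Notes on version B (the rewrite author's own statement) =====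
-- stated objective: idiomatic
-- what changed: The hand-rolled index loop with its repeated last-character check is replaced by a single regex full-match of (?:12|2)*, i.e. a token scanner consuming '12' or '2' instead of per-index lookahead checks.
import Mathlib
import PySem

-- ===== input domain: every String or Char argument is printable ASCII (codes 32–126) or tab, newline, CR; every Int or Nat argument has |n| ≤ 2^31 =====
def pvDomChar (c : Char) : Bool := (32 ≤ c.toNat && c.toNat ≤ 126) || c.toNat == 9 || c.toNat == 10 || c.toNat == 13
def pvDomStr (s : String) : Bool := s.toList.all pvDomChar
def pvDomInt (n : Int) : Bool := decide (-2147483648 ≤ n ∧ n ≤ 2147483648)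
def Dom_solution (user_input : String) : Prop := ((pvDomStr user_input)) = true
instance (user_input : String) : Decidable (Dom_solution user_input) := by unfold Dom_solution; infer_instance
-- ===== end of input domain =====

-- B replaces A's index loop (with its repeated last-character check) by a regex full-match
-- of (?:12|2)*, ported as a token scanner consuming '12' or '2'; same O(n) cost, more idiomatic.


-- ===== PORT A =====
-- the for-loop over range(len(user_input)), with Python's indexing (user_input[-1] via pyGet?)
def solutionGo (cs : List Char) (i : Nat) : Bool :=
  if i < cs.length then
    if PySem.List.pyGet? cs (-1) = some '1' then false
    else if PySem.List.pyGet? cs (i : Int) ≠ some '1' ∧ PySem.List.pyGet? cs (i : Int) ≠ some '2' then false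
    else if i < cs.length - 1 ∧ PySem.List.pyGet? cs (i : Int) = some '1' ∧ PySem.List.pyGet? cs ((i : Int) + 1) ≠ some '2' then false
    else solutionGo cs (i + 1)
  else true
termination_by cs.length - i

def solution (user_input : String) : Bool := solutionGo user_input.toList 0

-- ===== PORT B =====
-- Source B matches the whole string against (?:12|2)*: a deterministic scanner that at each step
-- consumes the alternative '12' (tried first) or '2', and accepts exactly at the end
def starScan : List Char → Bool
  | [] => true
  | c :: rest =>
      if c = '1' then
        match rest with
        | d :: rest' => if d = '2' then starScan rest' else false
        | [] => false
      else if c = '2' then starScan rest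
      else false

def solution_alt (user_input : String) : Bool := starScan user_input.toList

-- ===== PRECONDITION & SPEC =====
def Spec_solution (user_input : String) (out : Bool) : Prop := out = solution_alt user_input
instance (user_input : String) (out : Bool) : Decidable (Spec_solution user_input out) := by unfold Spec_solution; infer_instance

-- ===== CLAIM (what is proved, stated in full; the proofs are below) =====
def Claim_equal_solution : Prop := ∀ (user_input : String), Dom_solution user_input → Spec_solution user_input (solution user_input)

-- ===== LEMMAS AND PROOFS =====

theorem starScan_one_two (r : List Char) : starScan ('1' :: '2' :: r) = starScan r := by
  simp [starScan]

theorem starScan_one_cons {d : Char} (r : List Char) (hd : d ≠ '2') :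
    starScan ('1' :: d :: r) = false := by
  simp [starScan, hd]

theorem starScan_two (r : List Char) : starScan ('2' :: r) = starScan r := by
  rw [starScan.eq_def]; simp

theorem starScan_other {c : Char} (r : List Char) (h1 : c ≠ '1') (h2 : c ≠ '2') :
    starScan (c :: r) = false := by
  rw [starScan.eq_def]; simp [h1, h2]

-- if the whole string ends in '1', the scanner rejects
theorem starScan_last_one : ∀ (cs : List Char), cs.getLast? = some '1' → starScan cs = false := by
  intro cs
  induction cs using starScan.induct with
  | case1 => simp
  | case2 rest' ih =>
      intro h
      rw [starScan_one_two]
      cases rest' with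
      | nil => simp at h
      | cons a t =>
          apply ih
          simpa only [List.getLast?_cons_cons] using h
  | case3 d rest' hd =>
      intro _
      exact starScan_one_cons rest' hd
  | case4 =>
      intro _
      simp [starScan]
  | case5 rest _ ih =>
      intro h
      rw [starScan_two]
      cases rest with
      | nil => simp at h
      | cons a t =>
          apply ih
          simpa only [List.getLast?_cons_cons] using h
  | case6 c rest h1 h2 =>
      intro _
      exact starScan_other rest h1 h2

-- the loop from index i behaves as the scanner on the suffix, provided the string does not end in '1'
theorem solutionGo_eq_starScan (cs : List Char) (hlast : cs.getLast? ≠ some '1') :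
    ∀ i, solutionGo cs i = starScan (cs.drop i) := by
  have key : ∀ (k i : Nat), cs.length - i ≤ k → solutionGo cs i = starScan (cs.drop i) := by
    intro k
    induction k with
    | zero =>
        intro i hk
        have hge : cs.length ≤ i := by omega
        rw [solutionGo, if_neg (by omega), List.drop_of_length_le hge]
        rfl
    | succ k ihk =>
        intro i hk
        rw [solutionGo]
        by_cases hi : i < cs.length
        · simp only [hi, if_true]
          rw [PySem.List.pyGet?_neg_one]
          rw [if_neg hlast]
          have hdrop : cs.drop i = cs[i] :: cs.drop (i + 1) := List.drop_eq_getElem_cons hi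
          have hget : PySem.List.pyGet? cs (i : Int) = some cs[i] := by
            rw [PySem.List.pyGet?_natCast, List.getElem?_eq_getElem hi]
          rw [hget]
          by_cases h2 : cs[i] ≠ '1' ∧ cs[i] ≠ '2'
          · rw [if_pos (by simpa using h2)]
            rw [hdrop]
            exact (starScan_other _ h2.1 h2.2).symm
          · rw [if_neg (by simpa using h2)]
            push Not at h2
            by_cases h1 : cs[i] = '1'
            · -- current char '1': the next index exists (else cs would end in '1') and must hold '2'
              have hlt : i < cs.length - 1 := by
                rcases Nat.lt_or_ge i (cs.length - 1) with h | h
                · exact h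
                · exfalso
                  have hieq : i = cs.length - 1 := by omega
                  apply hlast
                  rw [List.getLast?_eq_getElem?, ← hieq, List.getElem?_eq_getElem hi, h1]
              have hi1 : i + 1 < cs.length := by omega
              have hget1 : PySem.List.pyGet? cs ((i : Int) + 1) = some cs[i+1] := by
                have h' : ((i : Int) + 1) = ((i + 1 : Nat) : Int) := by push_cast; ring
                rw [h', PySem.List.pyGet?_natCast, List.getElem?_eq_getElem hi1]
              rw [hget1]
              have hdrop1 : cs.drop (i+1) = cs[i+1] :: cs.drop (i + 2) := List.drop_eq_getElem_cons hi1
              by_cases h12 : cs[i+1] = '2'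
              · rw [if_neg (by simp [h12])]
                rw [ihk (i+1) (by omega), hdrop, h1, hdrop1, h12, starScan_two, starScan_one_two]
              · rw [if_pos ⟨hlt, by simp [h1], by simpa using h12⟩]
                rw [hdrop, hdrop1, h1]
                exact (starScan_one_cons _ h12).symm
            · have h22 : cs[i] = '2' := h2 h1
              rw [if_neg (by simp [h22])]
              rw [ihk (i+1) (by omega), hdrop, h22, starScan_two]
        · simp only [hi, if_false]
          rw [List.drop_of_length_le (by omega)]
          rfl
  intro i
  exact key (cs.length - i) i le_rfl

-- ===== VERDICT (by name: the statement is the Claim_ definition above) =====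
theorem solution_spec : Claim_equal_solution := by
  intro s _
  unfold Spec_solution solution solution_alt
  by_cases h : s.toList.getLast? = some '1'
  · rw [starScan_last_one _ h]
    rw [solutionGo]
    have hne : s.toList ≠ [] := by intro hnil; rw [hnil] at h; simp at h
    have hlen : 0 < s.toList.length := List.length_pos_iff.mpr hne
    rw [if_pos hlen, PySem.List.pyGet?_neg_one, if_pos h]
  · rw [solutionGo_eq_starScan _ h 0, List.drop_zero]
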